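-- pv_equiv track=rewrite | github.com/AppiahEnoch/T1 | create_table.py | generate_short_name
-- ===== SOURCE A (Python) =====
-- def generate_short_name(subject):
--     words = subject.split()
--     short_name = ""
--
--     # Loop through each word and accumulate characters until short_name is 5 characters long
--     for word in words:
--         needed_length = 5 - len(short_name)
--         short_name += word[:needed_length].upper()
--         if len(short_name) >= 5:
--             break
--
--     # Ensure the short name is exactly 5 characters
--     return short_name[:5]
-- ===== SOURCE B (Python) =====
-- def generate_short_name(subject):
--     return "".join(subject.split()).upper()[:5]
-- ===== Notes on version B (the rewrite author's own statement) =====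
-- stated objective: simpler
-- what changed: Replaces the accumulate-with-decreasing-needed-length loop and early break by one closed expression: join all words, uppercase, truncate to 5.
import Mathlib
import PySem

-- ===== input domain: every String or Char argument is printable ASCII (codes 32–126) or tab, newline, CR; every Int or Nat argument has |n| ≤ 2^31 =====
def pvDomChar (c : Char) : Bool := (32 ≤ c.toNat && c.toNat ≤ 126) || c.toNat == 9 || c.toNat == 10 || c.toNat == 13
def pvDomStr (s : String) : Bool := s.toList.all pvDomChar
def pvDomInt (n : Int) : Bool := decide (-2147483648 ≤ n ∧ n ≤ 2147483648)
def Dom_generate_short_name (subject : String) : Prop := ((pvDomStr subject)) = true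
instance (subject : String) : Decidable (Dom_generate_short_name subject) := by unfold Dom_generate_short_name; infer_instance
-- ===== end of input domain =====

-- B replaces A's accumulate-until-5 loop (decreasing needed-length slice, early break) by one
-- closed expression — join the words, uppercase, truncate to 5; objective: simpler.
-- Strings are handled on code points via PySem.Chars (exact on the ASCII domain).

-- ===== PORT A =====
-- the for-loop with its early 'break', as structural recursion over the word list
def gsnLoop : List (List Char) → List Char → List Char
  | [], acc => acc
  | w :: ws, acc =>
    let needed : Int := 5 - (acc.length : Int)
    let acc' := acc ++ PySem.Chars.upper (PySem.Chars.slice w none (some needed))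
    if 5 ≤ acc'.length then acc' else gsnLoop ws acc'

def generate_short_name (subject : String) : String :=
  String.ofList (PySem.Chars.slice (gsnLoop (PySem.Chars.split₀ subject.toList) []) none (some 5))

-- ===== PORT B =====
def generate_short_name_alt (subject : String) : String :=
  String.ofList (PySem.Chars.slice
    (PySem.Chars.upper (PySem.Chars.join [] (PySem.Chars.split₀ subject.toList)))
    none (some 5))

-- ===== PRECONDITION & SPEC =====
def Spec_generate_short_name (subject : String) (out : String) : Prop := out = generate_short_name_alt subject
instance (subject : String) (out : String) : Decidable (Spec_generate_short_name subject out) := by unfold Spec_generate_short_name; infer_instance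

-- ===== CLAIM (what is proved, stated in full; the proofs are below) =====
def Claim_equal_generate_short_name : Prop := ∀ (subject : String), Dom_generate_short_name subject → Spec_generate_short_name subject (generate_short_name subject)

-- ===== LEMMAS AND PROOFS =====

theorem join_nil_eq_flatten (ws : List (List Char)) :
    PySem.Chars.join [] ws = ws.flatten := by
  induction ws with
  | nil => rfl
  | cons w ws ih =>
    cases ws with
    | nil => simp [PySem.Chars.join, List.intercalate]
    | cons v vs =>
      rw [PySem.Chars.join_cons_cons, ih]
      simp

theorem gsnLoop_take (ws : List (List Char)) :
    ∀ acc : List Char, acc.length < 5 →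
      (gsnLoop ws acc).take 5
        = (acc ++ ws.flatten.map PySem.Chars.upperChar).take 5 := by
  induction ws with
  | nil =>
    intro acc h
    simp [gsnLoop]
  | cons w ws ih =>
    intro acc h
    have hk : (0:Int) ≤ 5 - (acc.length : Int) := by omega
    have hkn : ((5 - (acc.length : Int))).toNat = 5 - acc.length := by omega
    rw [gsnLoop]
    simp only [PySem.Chars.slice_eq_listSlice, PySem.List.slice_to _ hk, hkn,
      PySem.Chars.upper, List.map_take]
    set k := 5 - acc.length with hkdef
    have hkpos : 0 < k := by omega
    by_cases hge : 5 ≤ (acc ++ (List.take k (w.map PySem.Chars.upperChar))).length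
    · simp only [if_pos hge]
      have hwk : k ≤ w.length := by
        simp [List.length_append, List.length_take] at hge
        omega
      have hlen : (acc ++ (List.take k (w.map PySem.Chars.upperChar))).length = 5 := by
        simp [List.length_append, List.length_take]
        omega
      rw [List.take_of_length_le (le_of_eq hlen)]
      rw [List.flatten_cons, List.map_append, ← List.append_assoc,
        List.take_append]
      have h1 : 5 - (acc ++ w.map PySem.Chars.upperChar).length = 0 := by
        simp; omega
      rw [h1, List.take_zero, List.append_nil, List.take_append,
        List.take_of_length_le (by omega : acc.length ≤ 5)]
    · simp only [if_neg hge]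
      have hwk : w.length < k := by
        simp [List.length_append, List.length_take] at hge ⊢
        omega
      have htw : List.take k (w.map PySem.Chars.upperChar) = w.map PySem.Chars.upperChar := by
        apply List.take_of_length_le; simp; omega
      rw [htw]
      have hlt : (acc ++ w.map PySem.Chars.upperChar).length < 5 := by
        simp; omega
      rw [ih _ hlt]
      simp [List.flatten_cons]

-- ===== VERDICT (by name: the statement is the Claim_ definition above) =====
theorem generate_short_name_spec : Claim_equal_generate_short_name := by
  intro subject _
  unfold Spec_generate_short_name generate_short_name generate_short_name_alt
  congr 1
  rw [join_nil_eq_flatten]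
  simp only [PySem.Chars.slice_eq_listSlice,
    PySem.List.slice_to _ (by norm_num : (0:Int) ≤ 5), PySem.Chars.upper]
  have := gsnLoop_take (PySem.Chars.split₀ subject.toList) [] (by simp)
  simpa using this
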